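-- pv_equiv track=rewrite | github.com/42lan/bootcamp_python | day00/ex05/kata02.py | add_format
-- ===== SOURCE A (Python) =====
-- def add_format(date):
--     i = 0
--     length = len(date)
--     formatted_data = ""
--     while i < length:
--         formatted_data += date[i]
--         if i < 2:
--             j = '/'
--         elif i == 2:
--             j = ' '
--         elif i > 2:
--             j = ':'
--         if i < length - 1:
--             formatted_data += j
--         i += 1
--     return formatted_data
-- ===== SOURCE B (Python) =====
-- def add_format(date):
--     head, tail = date[:3], date[3:]
--     if not tail:
--         return '/'.join(head)
--     return '/'.join(head) + ' ' + ':'.join(tail)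
-- ===== Notes on version B (the rewrite author's own statement) =====
-- stated objective: simpler
-- what changed: Replaces the index-branching while loop with slicing the string at position 3 and str.join on each piece ('/' for the first three chars, ':' for the rest, a single space between when the tail is non-empty).
import Mathlib
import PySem

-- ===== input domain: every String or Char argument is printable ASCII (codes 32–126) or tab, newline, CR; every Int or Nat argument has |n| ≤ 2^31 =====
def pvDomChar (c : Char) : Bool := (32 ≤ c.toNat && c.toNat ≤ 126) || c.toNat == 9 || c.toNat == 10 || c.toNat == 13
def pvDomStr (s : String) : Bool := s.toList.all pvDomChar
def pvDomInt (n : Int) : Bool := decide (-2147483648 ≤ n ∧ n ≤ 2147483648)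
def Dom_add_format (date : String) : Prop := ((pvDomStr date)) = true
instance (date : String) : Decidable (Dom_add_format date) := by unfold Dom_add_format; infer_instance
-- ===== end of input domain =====

-- B replaces A's index-branching while loop by slicing at position 3 and joining each piece ('simpler').

-- ===== PORT A =====
-- the while loop: i walks the characters; the remaining suffix is 'c :: rest',
-- 'i < length - 1' is 'rest ≠ []'; the accumulator string is kept as its char list.
def addFormatLoop : List Char → Nat → List Char → List Char
  | [], _, acc => acc
  | c :: rest, i, acc =>
      let acc := acc ++ [c]
      let j := if i < 2 then '/' else if i = 2 then ' ' else ':'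
      let acc := if rest ≠ [] then acc ++ [j] else acc
      addFormatLoop rest (i + 1) acc

def add_format (date : String) : String :=
  String.ofList (addFormatLoop date.toList 0 [])

-- ===== PORT B =====
def add_format_alt (date : String) : String :=
  let cs := date.toList
  let head := cs.take 3
  let tail := cs.drop 3
  if tail = [] then String.ofList (List.intersperse '/' head)
  else String.ofList (List.intersperse '/' head ++ [' '] ++ List.intersperse ':' tail)

-- ===== PRECONDITION & SPEC =====
def Spec_add_format (date : String) (out : String) : Prop := out = add_format_alt date
instance (date : String) (out : String) : Decidable (Spec_add_format date out) := by unfold Spec_add_format; infer_instance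

-- ===== CLAIM (what is proved, stated in full; the proofs are below) =====
def Claim_equal_add_format : Prop := ∀ (date : String), Dom_add_format date → Spec_add_format date (add_format date)

-- ===== LEMMAS AND PROOFS =====
theorem addFormatLoop_ge3 (cs : List Char) (i : Nat) (acc : List Char) (h : 3 ≤ i) :
    addFormatLoop cs i acc = acc ++ List.intersperse ':' cs := by
  induction cs generalizing i acc with
  | nil => simp [addFormatLoop]
  | cons c rest ih =>
      cases rest with
      | nil => simp [addFormatLoop, List.intersperse]
      | cons d t =>
          have hi : ¬ i < 2 := by omega
          have hi2 : ¬ i = 2 := by omega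
          rw [addFormatLoop]
          simp only [if_neg hi, if_neg hi2, ne_eq, reduceCtorEq, not_false_eq_true, if_true]
          rw [ih (i + 1) _ (by omega)]
          simp [List.intersperse]

theorem addFormatLoop_eq (cs : List Char) :
    addFormatLoop cs 0 [] =
      if cs.drop 3 = [] then List.intersperse '/' (cs.take 3)
      else List.intersperse '/' (cs.take 3) ++ [' '] ++ List.intersperse ':' (cs.drop 3) := by
  match cs with
  | [] => simp [addFormatLoop]
  | [a] => simp [addFormatLoop]
  | [a, b] => simp [addFormatLoop, List.intersperse]
  | [a, b, c] => simp [addFormatLoop, List.intersperse]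
  | a :: b :: c :: d :: t =>
      rw [addFormatLoop, addFormatLoop, addFormatLoop]
      norm_num
      rw [addFormatLoop_ge3 (d :: t) 3 _ (by omega)]
      simp

-- ===== VERDICT (by name: the statement is the Claim_ definition above) =====
theorem add_format_spec : Claim_equal_add_format := by
  intro date _
  unfold Spec_add_format add_format add_format_alt
  rw [addFormatLoop_eq]
  split <;> simp_all
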